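-- pv_equiv track=rewrite | github.com/chaan32/Algorithm | 프로그래머스/2/138476. 귤 고르기/귤 고르기.py | solution
-- ===== SOURCE A (Python) =====
-- def solution(k, tangerine):
--     # 각 귤 크기의 빈도를 저장할 딕셔너리 생성
--     d = {}
--     for size in tangerine:
--         if size in d:        # tangerine이 아니라 d에서 확인해야 함
--             d[size] += 1
--         else:
--             d[size] = 1
--
--     # 빈도를 내림차순으로 정렬
--     c = sorted(d.values(), reverse=True)
--
--     total = 0
--     kind_count = 0  # 종류 수 초기화
--     for count in c:
--         total += count
--         kind_count += 1
--         if total >= k: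
--             break
--
--     return kind_count
-- ===== SOURCE B (Python) =====
-- def solution(k, tangerine):
--     freq = {}
--     for size in tangerine:
--         freq[size] = freq.get(size, 0) + 1
--     if not freq:
--         return 0
--     maxf = max(freq.values())
--     buckets = [0] * (maxf + 1)
--     for f in freq.values():
--         buckets[f] += 1
--     total = 0
--     kinds = 0
--     for f in range(maxf, 0, -1):
--         for _ in range(buckets[f]):
--             total += f
--             kinds += 1
--             if total >= k:
--                 return kinds
--     return kinds
-- ===== Notes on version B (the rewrite author's own statement) =====
-- stated objective: alternative
-- what changed: B replaces A's comparison sort of the frequency values by a counting-sort bucket table indexed by frequency, scanned from the highest frequency downward with an inner per-kind loop that returns as soon as the running total reaches k.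
import Mathlib
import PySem

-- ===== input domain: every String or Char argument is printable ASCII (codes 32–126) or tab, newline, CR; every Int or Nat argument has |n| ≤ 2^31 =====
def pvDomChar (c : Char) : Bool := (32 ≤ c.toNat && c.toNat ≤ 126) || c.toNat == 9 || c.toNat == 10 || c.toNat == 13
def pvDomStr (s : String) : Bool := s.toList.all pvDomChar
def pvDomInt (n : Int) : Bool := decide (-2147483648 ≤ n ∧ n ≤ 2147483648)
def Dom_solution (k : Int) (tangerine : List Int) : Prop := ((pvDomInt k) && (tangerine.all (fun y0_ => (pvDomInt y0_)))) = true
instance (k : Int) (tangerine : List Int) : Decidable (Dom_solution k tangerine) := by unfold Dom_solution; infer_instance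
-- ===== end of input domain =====

-- B replaces A's comparison sort of the frequency list by a counting-sort bucket table
-- scanned from the highest frequency down (objective: alternative traversal, same result).

-- ===== PORT A =====
-- greedy loop: 'for count in c: total += count; kind_count += 1; if total >= k: break'
def pvLoopA (k : Int) : List Int → Int → Int → Int
  | [], _, kind_count => kind_count
  | c :: rest, total, kind_count =>
    let total := total + c
    let kind_count := kind_count + 1
    if total ≥ k then kind_count else pvLoopA k rest total kind_count

def solution (k : Int) (tangerine : List Int) : Int :=
  let d := tangerine.foldl (fun d size =>
    if d.contains size then d.insert size (d.getD size 0 + 1)  -- d[size] += 1 (key present, so getD 0 is Python's d[size])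
    else d.insert size 1) PySem.Dict.empty
  let c := PySem.List.sorted d.values (fun x => x) true
  pvLoopA k c 0 0

-- ===== PORT B =====
-- inner 'for _ in range(buckets[f])' with the early 'return kinds' (inl = returned, inr = state after the bucket)
def pvInnerB (k f : Int) : Nat → Int → Int → Sum Int (Int × Int)
  | 0, total, kinds => Sum.inr (total, kinds)
  | n + 1, total, kinds =>
    let total := total + f
    let kinds := kinds + 1
    if total ≥ k then Sum.inl kinds else pvInnerB k f n total kinds

-- outer 'for f in range(maxf, 0, -1)'
def pvOuterB (k : Int) (buckets : List Int) : List Int → Int → Int → Int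
  | [], _, kinds => kinds
  | f :: fs, total, kinds =>
    match pvInnerB k f (PySem.List.pyGetD buckets f 0).toNat total kinds with
    | Sum.inl ans => ans
    | Sum.inr (t, kc) => pvOuterB k buckets fs t kc

def solution_alt (k : Int) (tangerine : List Int) : Int :=
  let freq := tangerine.foldl (fun d size => d.insert size (d.getD size 0 + 1)) PySem.Dict.empty
  if freq.items = [] then 0
  else
    match PySem.List.max? freq.values (fun x => x) with
    | none => 0  -- unreachable: freq is nonempty here (Python's max would raise only on empty)
    | some maxf =>
      let buckets0 : List Int := List.replicate (maxf + 1).toNat 0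
      let buckets := freq.values.foldl
        (fun b f => PySem.List.pySetD b f (PySem.List.pyGetD b f 0 + 1)) buckets0
      pvOuterB k buckets (PySem.List.pyRange maxf 0 (-1)) 0 0

-- ===== PRECONDITION & SPEC =====
def Spec_solution (k : Int) (tangerine : List Int) (out : Int) : Prop := out = solution_alt k tangerine
instance (k : Int) (tangerine : List Int) (out : Int) : Decidable (Spec_solution k tangerine out) := by unfold Spec_solution; infer_instance

-- ===== CLAIM (what is proved, stated in full; the proofs are below) =====
def Claim_equal_solution : Prop := ∀ (k : Int) (tangerine : List Int), Dom_solution k tangerine → Spec_solution k tangerine (solution k tangerine)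

-- ===== LEMMAS AND PROOFS =====

-- the counting loops of A and of B build the same dict: collections-Counter of tangerine
theorem pvDictA_eq_counter (t : List Int) :
    t.foldl (fun d size =>
      if d.contains size then d.insert size (d.getD size 0 + 1)
      else d.insert size 1) PySem.Dict.empty = PySem.Dict.counter t := by
  have hf : (fun (d : PySem.Dict Int Int) size =>
      if d.contains size then d.insert size (d.getD size 0 + 1)
      else d.insert size 1) = fun d size => d.insert size (d.getD size 0 + 1) := by
    funext d x
    by_cases h : d.contains x = true
    · simp [h]
    · simp only [Bool.not_eq_true] at h
      simp [h, PySem.Dict.getD_of_not_contains d 0 h]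
  rw [hf, PySem.Dict.foldl_insert_getD_add_one_eq_counter]

-- count of x in a flatMap of replicates over distinct heads
theorem pvCount_flatMap_replicate (fs : List Int) (g : Int → Nat) (x : Int) (h : fs.Nodup) :
    (fs.flatMap fun f => List.replicate (g f) f).count x = if x ∈ fs then g x else 0 := by
  induction fs with
  | nil => simp
  | cons f fs ih =>
    simp only [List.flatMap_cons, List.count_append, List.count_replicate]
    rcases List.nodup_cons.mp h with ⟨hnm, hnd⟩
    by_cases hx : x = f
    · subst hx
      simp [ih hnd, hnm]
    · simp [hx, Ne.symm hx, ih hnd, List.mem_cons]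

-- a flatMap of constant chunks over a strictly decreasing head list is weakly decreasing
theorem pvPairwise_flatMap_replicate (fs : List Int) (g : Int → Nat)
    (h : fs.Pairwise (fun a b => b < a)) :
    (fs.flatMap fun f => List.replicate (g f) f).Pairwise (fun a b : Int => b ≤ a) := by
  induction fs with
  | nil => simp
  | cons f fs ih =>
    rcases List.pairwise_cons.mp h with ⟨hf, hfs⟩
    simp only [List.flatMap_cons]
    apply List.pairwise_append.mpr
    refine ⟨?_, ih hfs, ?_⟩
    · exact List.pairwise_replicate.mpr (Or.inr le_rfl)
    · intro a ha b hb
      obtain rfl := List.eq_of_mem_replicate ha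
      obtain ⟨fp, hfp, hb'⟩ := List.mem_flatMap.mp hb
      rw [List.eq_of_mem_replicate hb']
      exact le_of_lt (hf fp hfp)

-- the countdown range is strictly decreasing and duplicate-free
theorem pvRange_desc_pairwise (a b : Int) :
    (PySem.List.pyRange a b (-1)).Pairwise (fun x y => y < x) := by
  rw [PySem.List.pyRange_neg_one_eq_reverse]
  rw [List.pairwise_reverse]
  exact PySem.List.pairwise_lt_pyRange_one (b+1) (a+1)

theorem pvRange_desc_nodup (a b : Int) : (PySem.List.pyRange a b (-1)).Nodup := by
  rw [PySem.List.pyRange_neg_one_eq_reverse]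
  exact (List.nodup_reverse).mpr (PySem.List.nodup_pyRange_one _ _)

-- counting-sort correctness: the bucket expansion is a permutation of vals …
theorem pvPerm_expand (vals : List Int) (maxf : Int)
    (hb : ∀ v ∈ vals, 1 ≤ v ∧ v ≤ maxf) :
    ((PySem.List.pyRange maxf 0 (-1)).flatMap fun f => List.replicate (vals.count f) f).Perm vals := by
  apply (List.perm_iff_count).mpr
  intro x
  rw [pvCount_flatMap_replicate _ _ _ (pvRange_desc_nodup _ _)]
  by_cases hx : x ∈ PySem.List.pyRange maxf 0 (-1)
  · simp [hx]
  · have : x ∉ vals := by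
      intro hxv
      exact hx (PySem.List.mem_pyRange_neg_one.mpr ⟨(hb x hxv).1, (hb x hxv).2⟩)
    simp [hx, List.count_eq_zero_of_not_mem this]

-- … and hence IS Python's sorted(vals, reverse=True)
theorem pvSorted_eq_expand (vals : List Int) (maxf : Int)
    (hb : ∀ v ∈ vals, 1 ≤ v ∧ v ≤ maxf) :
    PySem.List.sorted vals (fun x => x) true =
      (PySem.List.pyRange maxf 0 (-1)).flatMap fun f => List.replicate (vals.count f) f := by
  have h1 : (PySem.List.sorted vals (fun x => x) true).Perm
      ((PySem.List.pyRange maxf 0 (-1)).flatMap fun f => List.replicate (vals.count f) f) :=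
    (PySem.List.sorted_perm vals (fun x => x) true).trans (pvPerm_expand vals maxf hb).symm
  have h2 := PySem.List.sorted_pairwise_rev vals (fun x => x)
  have h3 := pvPairwise_flatMap_replicate _ (fun f => vals.count f) (pvRange_desc_pairwise maxf 0)
  exact List.Perm.eq_of_pairwise (fun a b _ _ hab hba => le_antisymm hba hab) h2 h3 h1


-- B's bucket-building loop counts occurrences: buckets[i] = initial[i] + vs.count i
theorem pvBucketFold (vs : List Int) : ∀ (b : List Int),
    (∀ v ∈ vs, 1 ≤ v ∧ v < (b.length : Int)) →
    ∀ (i : Int), 0 ≤ i →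
    PySem.List.pyGetD (vs.foldl (fun b f => PySem.List.pySetD b f (PySem.List.pyGetD b f 0 + 1)) b) i 0
      = PySem.List.pyGetD b i 0 + (vs.count i : Int) := by
  induction vs with
  | nil => intro b _ i _; simp
  | cons v vs ih =>
    intro b hb i hi0
    have hv := hb v (by simp)
    simp only [List.foldl_cons]
    have hlen : (PySem.List.pySetD b v (PySem.List.pyGetD b v 0 + 1)).length = b.length :=
      PySem.List.length_pySetD b v _
    rw [ih _ (by intro w hw; rw [hlen]; exact hb w (List.mem_cons_of_mem _ hw)) i hi0]
    have hv' : ((v.toNat : Nat) : Int) = v := Int.toNat_of_nonneg (by omega)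
    have hi' : ((i.toNat : Nat) : Int) = i := Int.toNat_of_nonneg hi0
    have hvl : v.toNat < b.length := by omega
    rw [← hv', ← hi', PySem.List.pyGetD_pySetD_natCast b v.toNat i.toNat _ 0 hvl]
    by_cases hiv : i = v
    · have : i.toNat = v.toNat := by omega
      rw [if_pos this, hv', hi', hiv, List.count_cons_self]
      push_cast
      ring
    · have hne : ¬ (i.toNat = v.toNat) := by omega
      rw [if_neg hne, hv', hi', List.count_cons_of_ne (by exact fun h => hiv h.symm)]

-- A's break-loop over one bucket's worth of equal counts is B's inner loop
theorem pvInner_loopA (k f : Int) : ∀ (n : Nat) (rest : List Int) (total kinds : Int),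
    pvLoopA k (List.replicate n f ++ rest) total kinds =
      (match pvInnerB k f n total kinds with
       | Sum.inl a => a
       | Sum.inr (t, kc) => pvLoopA k rest t kc) := by
  intro n
  induction n with
  | zero => intro rest total kinds; simp [pvInnerB]
  | succ n ih =>
    intro rest total kinds
    simp only [List.replicate_succ, List.cons_append, pvLoopA, pvInnerB]
    by_cases h : total + f ≥ k
    · simp [h]
    · simp [h, ih]

-- B's nested loops are A's break-loop over the bucket expansion
theorem pvOuter_loopA (k : Int) (buckets : List Int) : ∀ (fs : List Int) (total kinds : Int),
    pvOuterB k buckets fs total kinds =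
      pvLoopA k (fs.flatMap fun f => List.replicate (PySem.List.pyGetD buckets f 0).toNat f) total kinds := by
  intro fs
  induction fs with
  | nil => intro total kinds; simp [pvOuterB, pvLoopA]
  | cons f fs ih =>
    intro total kinds
    simp only [pvOuterB, List.flatMap_cons]
    rw [pvInner_loopA]
    cases h : pvInnerB k f (PySem.List.pyGetD buckets f 0).toNat total kinds with
    | inl a => rfl
    | inr p => simp [ih]

theorem pvFlatMap_congr (fs : List Int) (g h : Int → List Int) (he : ∀ f ∈ fs, g f = h f) :
    fs.flatMap g = fs.flatMap h := by
  induction fs with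
  | nil => rfl
  | cons f fs ih =>
    simp only [List.flatMap_cons]
    rw [he f (by simp), ih (fun x hx => he x (List.mem_cons_of_mem _ hx))]

-- ===== VERDICT (by name: the statement is the Claim_ definition above) =====
theorem solution_spec : Claim_equal_solution := by
  intro k t _
  unfold Spec_solution solution solution_alt
  simp only [pvDictA_eq_counter, PySem.Dict.foldl_insert_getD_add_one_eq_counter]
  have hvals : (PySem.Dict.counter t).values
      = (PySem.Set.ofList t).map (fun s => ((t.count s : Nat) : Int)) := by
    show ((PySem.Dict.counter t).items).map Prod.snd = _
    rw [PySem.Dict.items_counter, List.map_map]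
    rfl
  by_cases ht : t = []
  · subst ht
    rfl
  · have hsne : PySem.Set.ofList t ≠ [] := by
      intro h
      rcases List.exists_mem_of_ne_nil t ht with ⟨x, hx⟩
      have := (PySem.Set.mem_ofList t x).mpr hx
      simp [h] at this
    have hitems : (PySem.Dict.counter t).items ≠ [] := by
      rw [PySem.Dict.items_counter]
      simpa using hsne
    rw [if_neg hitems]
    have hvne : (PySem.Dict.counter t).values ≠ [] := by
      rw [hvals]; simpa using hsne
    obtain ⟨maxf, hmax⟩ : ∃ m, PySem.List.max? (PySem.Dict.counter t).values (fun x => x) = some m := by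
      cases h : PySem.List.max? (PySem.Dict.counter t).values (fun x => x) with
      | none => exact absurd ((PySem.List.max?_eq_none_iff _ _).mp h) hvne
      | some m => exact ⟨m, rfl⟩
    rw [hmax]
    simp only []
    set vals := (PySem.Dict.counter t).values with hv
    have hb : ∀ v ∈ vals, 1 ≤ v ∧ v ≤ maxf := by
      intro v hvv
      refine ⟨?_, PySem.List.max?_isMax hmax v hvv⟩
      rw [hvals] at hvv
      obtain ⟨s, hs, rfl⟩ := List.mem_map.mp hvv
      have : s ∈ t := (PySem.Set.mem_ofList t s).mp hs
      have : 0 < t.count s := List.count_pos_iff.mpr this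
      omega
    have hmax1 : 1 ≤ maxf := by
      rcases List.exists_mem_of_ne_nil vals hvne with ⟨v, hvv⟩
      have := hb v hvv
      omega
    have hbuck : ∀ f ∈ PySem.List.pyRange maxf 0 (-1),
        (PySem.List.pyGetD (vals.foldl
            (fun b f => PySem.List.pySetD b f (PySem.List.pyGetD b f 0 + 1))
            (List.replicate (maxf + 1).toNat (0 : Int))) f 0).toNat = vals.count f := by
      intro f hf
      have hf' := PySem.List.mem_pyRange_neg_one.mp hf
      have hlen : ((List.replicate (maxf + 1).toNat (0 : Int)).length : Int) = maxf + 1 := by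
        rw [List.length_replicate]; omega
      rw [pvBucketFold vals _ (by intro w hw; rw [hlen]; have := hb w hw; omega) f (by omega)]
      have h0 : PySem.List.pyGetD (List.replicate (maxf + 1).toNat (0 : Int)) f 0 = 0 := by
        rw [PySem.List.pyGetD_of_nonneg _ _ (by omega)]
        rw [List.getD_eq_getElem?_getD]
        rcases h : (List.replicate (maxf + 1).toNat (0 : Int))[f.toNat]? with _ | v
        · rfl
        · simp only [List.eq_of_mem_replicate (List.mem_of_getElem? h)]
          rfl
      rw [h0, zero_add, Int.toNat_natCast]
    rw [pvOuter_loopA, pvFlatMap_congr _ _ (fun f => List.replicate (vals.count f) f)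
        (fun f hf => by rw [hbuck f hf]), pvSorted_eq_expand vals maxf hb]
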